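-- pv_equiv track=rewrite | github.com/ArthurWish/m6a_Project | scripts/dataset/RMPore.py | _split_rbp_by_role
-- ===== SOURCE A (Python) =====
-- RBP_ROLE_BY_MOD: dict[str, dict[str, str]] = {
--     "m6A": {
--         "METTL3": "writer", "METTL14": "writer", "METTL16": "writer",
--         "WTAP": "writer", "VIRMA": "writer", "KIAA1429": "writer",
--         "RBM15": "writer", "RBM15B": "writer", "ZC3H13": "writer",
--         "CBLL1": "writer", "HAKAI": "writer",
--         "YTHDF1": "reader", "YTHDF2": "reader", "YTHDF3": "reader",
--         "YTHDC1": "reader", "YTHDC2": "reader",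
--         "IGF2BP1": "reader", "IGF2BP2": "reader", "IGF2BP3": "reader",
--         "HNRNPA2B1": "reader", "HNRNPC": "reader",
--         "HNRNPG": "reader", "RBMX": "reader",
--         "FMR1": "reader", "FMRP": "reader", "PRRC2A": "reader",
--         "EIF3A": "reader", "EIF3B": "reader", "LRPPRC": "reader",
--         "FTO": "eraser", "ALKBH5": "eraser",
--     },
--     "m1A": {
--         "TRMT6": "writer", "TRMT61A": "writer",
--         "TRMT61B": "writer", "TRMT10C": "writer",
--         "YTHDF1": "reader", "YTHDF2": "reader", "YTHDF3": "reader",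
--         "ALKBH1": "eraser", "ALKBH3": "eraser",
--     },
--     "m5C": {
--         "NSUN1": "writer", "NSUN2": "writer", "NSUN3": "writer",
--         "NSUN4": "writer", "NSUN5": "writer", "NSUN6": "writer",
--         "NSUN7": "writer", "DNMT2": "writer", "TRDMT1": "writer",
--         "ALYREF": "reader", "YBX1": "reader", "YBX2": "reader",
--     },
--     "pseu": {
--         "PUS1": "writer", "PUS3": "writer", "PUS7": "writer",
--         "PUS7L": "writer", "PUS10": "writer",
--         "TRUB1": "writer", "TRUB2": "writer", "DKC1": "writer",
--         "RPUSD1": "writer", "RPUSD2": "writer",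
--         "RPUSD3": "writer", "RPUSD4": "writer",
--     },
-- }
--
-- def classify_rbp_role(name: str, mod_type: str) -> str:
--     """Return writer/reader/eraser only if the RBP is known for *this* mod_type."""
--     role_map = RBP_ROLE_BY_MOD.get(mod_type, {})
--     return role_map.get(name.upper(), "unknown")
--
-- def _split_rbp_by_role(names: list[str], mod_type: str) -> dict[str, list[str] | None]:
--     """Classify RBP names into writer / reader / eraser only.
--     RBPs unrelated to the current mod_type are silently dropped."""
--     buckets: dict[str, list[str]] = {
--         "writer": [], "reader": [], "eraser": [],
--     }
--     for n in names:
--         role = classify_rbp_role(n, mod_type)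
--         if role in buckets:
--             buckets[role].append(n)
--     return {k: (sorted(v) if v else None) for k, v in buckets.items()}
-- ===== SOURCE B (Python) =====
-- # B: role-first inverted index + one upfront sort.  The module constant is re-stated
-- # role-first (role -> frozenset of member names per modification); the function sorts
-- # the input once and takes, for each role in order, the members-filtered slice of the
-- # sorted list (already sorted, no per-bucket sort and no mutable buckets).
-- ROLE_ORDER = ("writer", "reader", "eraser")
--
-- ROLE_MEMBERS = {
--     "m6A": {
--         "writer": frozenset({
--             "METTL3", "METTL14", "METTL16", "WTAP", "VIRMA", "KIAA1429",
--             "RBM15", "RBM15B", "ZC3H13", "CBLL1", "HAKAI",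
--         }),
--         "reader": frozenset({
--             "YTHDF1", "YTHDF2", "YTHDF3", "YTHDC1", "YTHDC2",
--             "IGF2BP1", "IGF2BP2", "IGF2BP3", "HNRNPA2B1", "HNRNPC",
--             "HNRNPG", "RBMX", "FMR1", "FMRP", "PRRC2A",
--             "EIF3A", "EIF3B", "LRPPRC",
--         }),
--         "eraser": frozenset({"FTO", "ALKBH5"}),
--     },
--     "m1A": {
--         "writer": frozenset({"TRMT6", "TRMT61A", "TRMT61B", "TRMT10C"}),
--         "reader": frozenset({"YTHDF1", "YTHDF2", "YTHDF3"}),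
--         "eraser": frozenset({"ALKBH1", "ALKBH3"}),
--     },
--     "m5C": {
--         "writer": frozenset({
--             "NSUN1", "NSUN2", "NSUN3", "NSUN4", "NSUN5", "NSUN6",
--             "NSUN7", "DNMT2", "TRDMT1",
--         }),
--         "reader": frozenset({"ALYREF", "YBX1", "YBX2"}),
--         "eraser": frozenset(),
--     },
--     "pseu": {
--         "writer": frozenset({
--             "PUS1", "PUS3", "PUS7", "PUS7L", "PUS10",
--             "TRUB1", "TRUB2", "DKC1",
--             "RPUSD1", "RPUSD2", "RPUSD3", "RPUSD4",
--         }),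
--         "reader": frozenset(),
--         "eraser": frozenset(),
--     },
-- }
--
--
-- def _split_rbp_by_role(names, mod_type):
--     members = ROLE_MEMBERS.get(mod_type, {})
--     ordered = sorted(names)
--     return {
--         role: ([n for n in ordered if n.upper() in members.get(role, frozenset())]
--                or None)
--         for role in ROLE_ORDER
--     }
-- ===== Notes on version B (the rewrite author's own statement) =====
-- stated objective: alternative
-- what changed: B replaces A's classify-dispatch into mutable role buckets (each sorted at the end) by a role-first inverted index (role -> member-name sets) plus one upfront sort of the input, taking each bucket as the membership-filtered slice of the sorted list.
import Mathlib
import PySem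

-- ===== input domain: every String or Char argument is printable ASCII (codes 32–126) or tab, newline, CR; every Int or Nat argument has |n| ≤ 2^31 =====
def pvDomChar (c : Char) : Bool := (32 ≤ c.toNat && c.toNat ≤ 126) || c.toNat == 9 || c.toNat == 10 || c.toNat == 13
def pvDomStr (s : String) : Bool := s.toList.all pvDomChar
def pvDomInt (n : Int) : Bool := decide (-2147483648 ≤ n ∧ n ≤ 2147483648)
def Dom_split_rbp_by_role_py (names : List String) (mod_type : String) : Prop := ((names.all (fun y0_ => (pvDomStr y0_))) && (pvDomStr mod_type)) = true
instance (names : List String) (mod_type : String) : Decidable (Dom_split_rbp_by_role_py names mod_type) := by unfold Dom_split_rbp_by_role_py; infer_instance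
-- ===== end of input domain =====

-- B re-states the module constant as a role-first inverted index (role -> member sets),
-- sorts the input once up front and takes per-role membership-filtered slices of the
-- sorted list — no classify dispatch, no mutable buckets, no per-bucket sort (alternative).

-- ===== PORT A =====
-- module constant RBP_ROLE_BY_MOD (name -> role, per modification), as A reads it
def pvRoleTable : PySem.Dict String (PySem.Dict String String) :=
  PySem.Dict.ofList [
    ("m6A", PySem.Dict.ofList [("METTL3", "writer"), ("METTL14", "writer"), ("METTL16", "writer"), ("WTAP", "writer"), ("VIRMA", "writer"), ("KIAA1429", "writer"), ("RBM15", "writer"), ("RBM15B", "writer"), ("ZC3H13", "writer"), ("CBLL1", "writer"), ("HAKAI", "writer"), ("YTHDF1", "reader"), ("YTHDF2", "reader"), ("YTHDF3", "reader"), ("YTHDC1", "reader"), ("YTHDC2", "reader"), ("IGF2BP1", "reader"), ("IGF2BP2", "reader"), ("IGF2BP3", "reader"), ("HNRNPA2B1", "reader"), ("HNRNPC", "reader"), ("HNRNPG", "reader"), ("RBMX", "reader"), ("FMR1", "reader"), ("FMRP", "reader"), ("PRRC2A", "reader"), ("EIF3A", "reader"), ("EIF3B", "reader"), ("LRPPRC",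 "reader"), ("FTO", "eraser"), ("ALKBH5", "eraser")]),
    ("m1A", PySem.Dict.ofList [("TRMT6", "writer"), ("TRMT61A", "writer"), ("TRMT61B", "writer"), ("TRMT10C", "writer"), ("YTHDF1", "reader"), ("YTHDF2", "reader"), ("YTHDF3", "reader"), ("ALKBH1", "eraser"), ("ALKBH3", "eraser")]),
    ("m5C", PySem.Dict.ofList [("NSUN1", "writer"), ("NSUN2", "writer"), ("NSUN3", "writer"), ("NSUN4", "writer"), ("NSUN5", "writer"), ("NSUN6", "writer"), ("NSUN7", "writer"), ("DNMT2", "writer"), ("TRDMT1", "writer"), ("ALYREF", "reader"), ("YBX1", "reader"), ("YBX2", "reader")]),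
    ("pseu", PySem.Dict.ofList [("PUS1", "writer"), ("PUS3", "writer"), ("PUS7", "writer"), ("PUS7L", "writer"), ("PUS10", "writer"), ("TRUB1", "writer"), ("TRUB2", "writer"), ("DKC1", "writer"), ("RPUSD1", "writer"), ("RPUSD2", "writer"), ("RPUSD3", "writer"), ("RPUSD4", "writer")])]

-- helper classify_rbp_role (A's dispatch)
def pvClassify (name : String) (mod_type : String) : String :=
  PySem.Dict.getD (PySem.Dict.getD pvRoleTable mod_type PySem.Dict.empty) (PySem.Str.upper name) "unknown"

-- loop body of A: dispatch n into one of the three buckets (writer, reader, eraser)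
def pvALoop (mod_type : String) (st : List String × List String × List String) (n : String) :
    List String × List String × List String :=
  let role := pvClassify n mod_type
  if role == "writer" then (st.1 ++ [n], st.2.1, st.2.2)
  else if role == "reader" then (st.1, st.2.1 ++ [n], st.2.2)
  else if role == "eraser" then (st.1, st.2.1, st.2.2 ++ [n])
  else st

def split_rbp_by_role_py (names : List String) (mod_type : String) : List (String × Option (List String)) :=
  let b := names.foldl (pvALoop mod_type) ([], [], [])
  [("writer", if b.1.isEmpty then none else some (PySem.List.sorted b.1 (fun x => x) false)),
   ("reader", if b.2.1.isEmpty then none else some (PySem.List.sorted b.2.1 (fun x => x) false)),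
   ("eraser", if b.2.2.isEmpty then none else some (PySem.List.sorted b.2.2 (fun x => x) false))]

-- ===== PORT B =====
-- B's module constants: ROLE_ORDER and the role-first inverted index ROLE_MEMBERS
def pvRoleOrder : List String := ["writer", "reader", "eraser"]

def pvRoleMembers : PySem.Dict String (PySem.Dict String (PySem.Set String)) :=
  PySem.Dict.ofList [
    ("m6A", PySem.Dict.ofList [
      ("writer", PySem.Set.ofList ["METTL3", "METTL14", "METTL16", "WTAP", "VIRMA", "KIAA1429", "RBM15", "RBM15B", "ZC3H13", "CBLL1", "HAKAI"]),
      ("reader", PySem.Set.ofList ["YTHDF1", "YTHDF2", "YTHDF3", "YTHDC1", "YTHDC2", "IGF2BP1", "IGF2BP2", "IGF2BP3", "HNRNPA2B1", "HNRNPC", "HNRNPG", "RBMX", "FMR1", "FMRP", "PRRC2A", "EIF3A", "EIF3B", "LRPPRC"]),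
      ("eraser", PySem.Set.ofList ["FTO", "ALKBH5"])]),
    ("m1A", PySem.Dict.ofList [
      ("writer", PySem.Set.ofList ["TRMT6", "TRMT61A", "TRMT61B", "TRMT10C"]),
      ("reader", PySem.Set.ofList ["YTHDF1", "YTHDF2", "YTHDF3"]),
      ("eraser", PySem.Set.ofList ["ALKBH1", "ALKBH3"])]),
    ("m5C", PySem.Dict.ofList [
      ("writer", PySem.Set.ofList ["NSUN1", "NSUN2", "NSUN3", "NSUN4", "NSUN5", "NSUN6", "NSUN7", "DNMT2", "TRDMT1"]),
      ("reader", PySem.Set.ofList ["ALYREF", "YBX1", "YBX2"]),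
      ("eraser", PySem.Set.empty)]),
    ("pseu", PySem.Dict.ofList [
      ("writer", PySem.Set.ofList ["PUS1", "PUS3", "PUS7", "PUS7L", "PUS10", "TRUB1", "TRUB2", "DKC1", "RPUSD1", "RPUSD2", "RPUSD3", "RPUSD4"]),
      ("reader", PySem.Set.empty),
      ("eraser", PySem.Set.empty)])]

def split_rbp_by_role_py_alt (names : List String) (mod_type : String) : List (String × Option (List String)) :=
  let members := PySem.Dict.getD pvRoleMembers mod_type PySem.Dict.empty
  let ordered := PySem.List.sorted names (fun x => x) false
  pvRoleOrder.map (fun role =>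
    (role,
      let hits := ordered.filter (fun n =>
        PySem.Set.contains (PySem.Dict.getD members role PySem.Set.empty) (PySem.Str.upper n))
      if hits.isEmpty then none else some hits))

-- ===== PRECONDITION & SPEC =====
def Spec_split_rbp_by_role_py (names : List String) (mod_type : String) (out : List (String × Option (List String))) : Prop := out = split_rbp_by_role_py_alt names mod_type
instance (names : List String) (mod_type : String) (out : List (String × Option (List String))) : Decidable (Spec_split_rbp_by_role_py names mod_type out) := by unfold Spec_split_rbp_by_role_py; infer_instance

-- ===== CLAIM (what is proved, stated in full; the proofs are below) =====
def Claim_equal_split_rbp_by_role_py : Prop := ∀ (names : List String) (mod_type : String), Dom_split_rbp_by_role_py names mod_type → Spec_split_rbp_by_role_py names mod_type (split_rbp_by_role_py names mod_type)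

-- ===== LEMMAS AND PROOFS =====

-- A's fold accumulates, in order, exactly the per-role filters onto the incoming buckets
theorem pvALoop_foldl_eq (mod_type : String) (names : List String) :
    ∀ (w r e : List String),
      names.foldl (pvALoop mod_type) (w, r, e) =
        (w ++ names.filter (fun n => pvClassify n mod_type == "writer"),
         r ++ names.filter (fun n => pvClassify n mod_type == "reader"),
         e ++ names.filter (fun n => pvClassify n mod_type == "eraser")) := by
  induction names with
  | nil => intro w r e; simp
  | cons n ns ih =>
    intro w r e
    simp only [List.foldl_cons, List.filter_cons, pvALoop]
    by_cases h1 : pvClassify n mod_type = "writer"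
    · simp [h1, ih]
    · by_cases h2 : pvClassify n mod_type = "reader"
      · simp [h2, ih]
      · by_cases h3 : pvClassify n mod_type = "eraser"
        · simp [h3, ih]
        · simp [h1, h2, h3, ih]

-- A's dispatch test and B's inverted-index membership test agree, for the three real roles
-- first-match association lookup equals membership in the role-filtered key list (keys distinct)
theorem pvAssoc (l : List (String × String)) (u role : String)
    (hrole : role ≠ "unknown") (hnd : (l.map Prod.fst).Nodup) :
    (((PySem.Dict.mk l).get? u).getD "unknown" == role) =
      decide (u ∈ (l.filter (fun p => p.2 == role)).map Prod.fst) := by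
  induction l with
  | nil =>
    simp [PySem.Dict.get?, beq_eq_false_iff_ne]
    exact fun h => (hrole h.symm).elim
  | cons p rest ih =>
    obtain ⟨k, v⟩ := p
    simp only [List.map_cons, List.nodup_cons] at hnd
    rw [PySem.Dict.get?_mk_cons]
    by_cases hk : k = u
    · subst hk
      by_cases hv : v = role
      · simp [hv]
      · simp only [beq_iff_eq, List.filter_cons]
        have hmem : k ∉ (rest.filter (fun p => p.2 == role)).map Prod.fst := by
          intro hc
          rcases List.mem_map.1 hc with ⟨x, hx, hxk⟩
          exact hnd.1 (hxk ▸ List.mem_map_of_mem (List.mem_of_mem_filter hx))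
        by_cases hvr : (v == role) = true
        · exact absurd (by simpa using hvr) hv
        · simp [hvr, hv, hmem]
    · rw [if_neg (by simpa using hk)]
      rw [ih hnd.2]
      simp only [List.filter_cons]
      by_cases hvr : (v == role) = true
      · simp [hvr, Ne.symm hk]
      · simp [hvr]

theorem pvMemTable (items : List (String × String)) (mem : List String) (u role : String)
    (hrole : role ≠ "unknown") (hnd : (items.map Prod.fst).Nodup)
    (hmem : (items.filter (fun p => p.2 == role)).map Prod.fst = mem) :
    (PySem.Dict.getD (PySem.Dict.mk items) u "unknown" == role) = PySem.Set.contains mem u := by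
  rw [PySem.Dict.getD_eq_get?_getD, pvAssoc items u role hrole hnd, hmem]
  simp

set_option maxHeartbeats 1000000 in
theorem pvPred_eq (mod_type n role : String)
    (hr : role = "writer" ∨ role = "reader" ∨ role = "eraser") :
    (pvClassify n mod_type == role) =
      PySem.Set.contains
        (PySem.Dict.getD (PySem.Dict.getD pvRoleMembers mod_type PySem.Dict.empty) role PySem.Set.empty)
        (PySem.Str.upper n) := by
  unfold pvClassify
  generalize PySem.Str.upper n = u
  by_cases h1 : mod_type = "m6A"
  · subst h1
    rcases hr with rfl | rfl | rfl
    · rw [show PySem.Dict.getD pvRoleTable "m6A" PySem.Dict.empty = PySem.Dict.mk [("METTL3", "writer"), ("METTL14", "writer"), ("METTL16", "writer"), ("WTAP", "writer"), ("VIRMA", "writer"), ("KIAA1429", "writer"), ("RBM15", "writer"), ("RBM15B", "writer"), ("ZC3H13", "writer"), ("CBLL1", "writer"), ("HAKAI", "writer"), ("YTHDF1", "reader"), ("YTHDF2", "reader"), ("YTHDF3", "reader"), ("YTHDC1", "reader"), ("YTHDC2", "reader"), ("IGF2BP1", "reader"), ("IGF2BP2", "reader"), ("IGF2BP3", "reader"),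 ("HNRNPA2B1", "reader"), ("HNRNPC", "reader"), ("HNRNPG", "reader"), ("RBMX", "reader"), ("FMR1", "reader"), ("FMRP", "reader"), ("PRRC2A", "reader"), ("EIF3A", "reader"), ("EIF3B", "reader"), ("LRPPRC", "reader"), ("FTO", "eraser"), ("ALKBH5", "eraser")] from rfl,
          show PySem.Dict.getD (PySem.Dict.getD pvRoleMembers "m6A" PySem.Dict.empty) "writer" PySem.Set.empty = ["METTL3", "METTL14", "METTL16", "WTAP", "VIRMA", "KIAA1429", "RBM15", "RBM15B", "ZC3H13", "CBLL1", "HAKAI"] from rfl]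
      exact pvMemTable _ _ u _ (by decide) (by decide) (by decide)
    · rw [show PySem.Dict.getD pvRoleTable "m6A" PySem.Dict.empty = PySem.Dict.mk [("METTL3", "writer"), ("METTL14", "writer"), ("METTL16", "writer"), ("WTAP", "writer"), ("VIRMA", "writer"), ("KIAA1429", "writer"), ("RBM15", "writer"), ("RBM15B", "writer"), ("ZC3H13", "writer"), ("CBLL1", "writer"), ("HAKAI", "writer"), ("YTHDF1", "reader"), ("YTHDF2", "reader"), ("YTHDF3", "reader"), ("YTHDC1", "reader"), ("YTHDC2", "reader"), ("IGF2BP1", "reader"), ("IGF2BP2", "reader"), ("IGF2BP3", "reader"), ("HNRNPA2B1", "reader"), ("HNRNPC", "reader"), ("HNRNPG", "reader"), ("RBMX", "reader"), ("FMR1", "reader"), ("FMRP", "reader"), ("PRRC2A", "reader"), ("EIF3A", "reader"), ("EIF3B", "reader"), ("LRPPRC", "reader"), ("FTO", "eraser"), ("ALKBH5", "eraser")] from rfl,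
          show PySem.Dict.getD (PySem.Dict.getD pvRoleMembers "m6A" PySem.Dict.empty) "reader" PySem.Set.empty = ["YTHDF1", "YTHDF2", "YTHDF3", "YTHDC1", "YTHDC2", "IGF2BP1", "IGF2BP2", "IGF2BP3", "HNRNPA2B1", "HNRNPC", "HNRNPG", "RBMX", "FMR1", "FMRP", "PRRC2A", "EIF3A", "EIF3B", "LRPPRC"] from rfl]
      exact pvMemTable _ _ u _ (by decide) (by decide) (by decide)
    · rw [show PySem.Dict.getD pvRoleTable "m6A" PySem.Dict.empty = PySem.Dict.mk [("METTL3", "writer"), ("METTL14", "writer"), ("METTL16", "writer"), ("WTAP", "writer"), ("VIRMA", "writer"), ("KIAA1429", "writer"), ("RBM15", "writer"), ("RBM15B", "writer"), ("ZC3H13", "writer"), ("CBLL1", "writer"), ("HAKAI", "writer"), ("YTHDF1", "reader"), ("YTHDF2", "reader"), ("YTHDF3", "reader"), ("YTHDC1", "reader"), ("YTHDC2", "reader"), ("IGF2BP1", "reader"), ("IGF2BP2", "reader"), ("IGF2BP3", "reader"), ("HNRNPA2B1", "reader"), ("HNRNPC", "reader"), ("HNRNPG", "reader"), ("RBMX",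 "reader"), ("FMR1", "reader"), ("FMRP", "reader"), ("PRRC2A", "reader"), ("EIF3A", "reader"), ("EIF3B", "reader"), ("LRPPRC", "reader"), ("FTO", "eraser"), ("ALKBH5", "eraser")] from rfl,
          show PySem.Dict.getD (PySem.Dict.getD pvRoleMembers "m6A" PySem.Dict.empty) "eraser" PySem.Set.empty = ["FTO", "ALKBH5"] from rfl]
      exact pvMemTable _ _ u _ (by decide) (by decide) (by decide)
  by_cases h2 : mod_type = "m1A"
  · subst h2
    rcases hr with rfl | rfl | rfl
    · rw [show PySem.Dict.getD pvRoleTable "m1A" PySem.Dict.empty = PySem.Dict.mk [("TRMT6", "writer"), ("TRMT61A", "writer"), ("TRMT61B", "writer"), ("TRMT10C", "writer"), ("YTHDF1", "reader"), ("YTHDF2", "reader"), ("YTHDF3", "reader"), ("ALKBH1", "eraser"), ("ALKBH3", "eraser")] from rfl,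
          show PySem.Dict.getD (PySem.Dict.getD pvRoleMembers "m1A" PySem.Dict.empty) "writer" PySem.Set.empty = ["TRMT6", "TRMT61A", "TRMT61B", "TRMT10C"] from rfl]
      exact pvMemTable _ _ u _ (by decide) (by decide) (by decide)
    · rw [show PySem.Dict.getD pvRoleTable "m1A" PySem.Dict.empty = PySem.Dict.mk [("TRMT6", "writer"), ("TRMT61A", "writer"), ("TRMT61B", "writer"), ("TRMT10C", "writer"), ("YTHDF1", "reader"), ("YTHDF2", "reader"), ("YTHDF3", "reader"), ("ALKBH1", "eraser"), ("ALKBH3", "eraser")] from rfl,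
          show PySem.Dict.getD (PySem.Dict.getD pvRoleMembers "m1A" PySem.Dict.empty) "reader" PySem.Set.empty = ["YTHDF1", "YTHDF2", "YTHDF3"] from rfl]
      exact pvMemTable _ _ u _ (by decide) (by decide) (by decide)
    · rw [show PySem.Dict.getD pvRoleTable "m1A" PySem.Dict.empty = PySem.Dict.mk [("TRMT6", "writer"), ("TRMT61A", "writer"), ("TRMT61B", "writer"), ("TRMT10C", "writer"), ("YTHDF1", "reader"), ("YTHDF2", "reader"), ("YTHDF3", "reader"), ("ALKBH1", "eraser"), ("ALKBH3", "eraser")] from rfl,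
          show PySem.Dict.getD (PySem.Dict.getD pvRoleMembers "m1A" PySem.Dict.empty) "eraser" PySem.Set.empty = ["ALKBH1", "ALKBH3"] from rfl]
      exact pvMemTable _ _ u _ (by decide) (by decide) (by decide)
  by_cases h3 : mod_type = "m5C"
  · subst h3
    rcases hr with rfl | rfl | rfl
    · rw [show PySem.Dict.getD pvRoleTable "m5C" PySem.Dict.empty = PySem.Dict.mk [("NSUN1", "writer"), ("NSUN2", "writer"), ("NSUN3", "writer"), ("NSUN4", "writer"), ("NSUN5", "writer"), ("NSUN6", "writer"), ("NSUN7", "writer"), ("DNMT2", "writer"), ("TRDMT1", "writer"), ("ALYREF", "reader"), ("YBX1", "reader"), ("YBX2", "reader")] from rfl,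
          show PySem.Dict.getD (PySem.Dict.getD pvRoleMembers "m5C" PySem.Dict.empty) "writer" PySem.Set.empty = ["NSUN1", "NSUN2", "NSUN3", "NSUN4", "NSUN5", "NSUN6", "NSUN7", "DNMT2", "TRDMT1"] from rfl]
      exact pvMemTable _ _ u _ (by decide) (by decide) (by decide)
    · rw [show PySem.Dict.getD pvRoleTable "m5C" PySem.Dict.empty = PySem.Dict.mk [("NSUN1", "writer"), ("NSUN2", "writer"), ("NSUN3", "writer"), ("NSUN4", "writer"), ("NSUN5", "writer"), ("NSUN6", "writer"), ("NSUN7", "writer"), ("DNMT2", "writer"), ("TRDMT1", "writer"), ("ALYREF", "reader"), ("YBX1", "reader"), ("YBX2", "reader")] from rfl,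
          show PySem.Dict.getD (PySem.Dict.getD pvRoleMembers "m5C" PySem.Dict.empty) "reader" PySem.Set.empty = ["ALYREF", "YBX1", "YBX2"] from rfl]
      exact pvMemTable _ _ u _ (by decide) (by decide) (by decide)
    · rw [show PySem.Dict.getD pvRoleTable "m5C" PySem.Dict.empty = PySem.Dict.mk [("NSUN1", "writer"), ("NSUN2", "writer"), ("NSUN3", "writer"), ("NSUN4", "writer"), ("NSUN5", "writer"), ("NSUN6", "writer"), ("NSUN7", "writer"), ("DNMT2", "writer"), ("TRDMT1", "writer"), ("ALYREF", "reader"), ("YBX1", "reader"), ("YBX2", "reader")] from rfl,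
          show PySem.Dict.getD (PySem.Dict.getD pvRoleMembers "m5C" PySem.Dict.empty) "eraser" PySem.Set.empty = [] from rfl]
      exact pvMemTable _ _ u _ (by decide) (by decide) (by decide)
  by_cases h4 : mod_type = "pseu"
  · subst h4
    rcases hr with rfl | rfl | rfl
    · rw [show PySem.Dict.getD pvRoleTable "pseu" PySem.Dict.empty = PySem.Dict.mk [("PUS1", "writer"), ("PUS3", "writer"), ("PUS7", "writer"), ("PUS7L", "writer"), ("PUS10", "writer"), ("TRUB1", "writer"), ("TRUB2", "writer"), ("DKC1", "writer"), ("RPUSD1", "writer"), ("RPUSD2", "writer"), ("RPUSD3", "writer"), ("RPUSD4", "writer")] from rfl,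
          show PySem.Dict.getD (PySem.Dict.getD pvRoleMembers "pseu" PySem.Dict.empty) "writer" PySem.Set.empty = ["PUS1", "PUS3", "PUS7", "PUS7L", "PUS10", "TRUB1", "TRUB2", "DKC1", "RPUSD1", "RPUSD2", "RPUSD3", "RPUSD4"] from rfl]
      exact pvMemTable _ _ u _ (by decide) (by decide) (by decide)
    · rw [show PySem.Dict.getD pvRoleTable "pseu" PySem.Dict.empty = PySem.Dict.mk [("PUS1", "writer"), ("PUS3", "writer"), ("PUS7", "writer"), ("PUS7L", "writer"), ("PUS10", "writer"), ("TRUB1", "writer"), ("TRUB2", "writer"), ("DKC1", "writer"), ("RPUSD1", "writer"), ("RPUSD2", "writer"), ("RPUSD3", "writer"), ("RPUSD4", "writer")] from rfl,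
          show PySem.Dict.getD (PySem.Dict.getD pvRoleMembers "pseu" PySem.Dict.empty) "reader" PySem.Set.empty = [] from rfl]
      exact pvMemTable _ _ u _ (by decide) (by decide) (by decide)
    · rw [show PySem.Dict.getD pvRoleTable "pseu" PySem.Dict.empty = PySem.Dict.mk [("PUS1", "writer"), ("PUS3", "writer"), ("PUS7", "writer"), ("PUS7L", "writer"), ("PUS10", "writer"), ("TRUB1", "writer"), ("TRUB2", "writer"), ("DKC1", "writer"), ("RPUSD1", "writer"), ("RPUSD2", "writer"), ("RPUSD3", "writer"), ("RPUSD4", "writer")] from rfl,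
          show PySem.Dict.getD (PySem.Dict.getD pvRoleMembers "pseu" PySem.Dict.empty) "eraser" PySem.Set.empty = [] from rfl]
      exact pvMemTable _ _ u _ (by decide) (by decide) (by decide)
  rw [show PySem.Dict.getD pvRoleTable = fun k d => ((PySem.Dict.mk [("m6A", PySem.Dict.ofList [("METTL3", "writer"), ("METTL14", "writer"), ("METTL16", "writer"), ("WTAP", "writer"), ("VIRMA", "writer"), ("KIAA1429", "writer"), ("RBM15", "writer"), ("RBM15B", "writer"), ("ZC3H13", "writer"), ("CBLL1", "writer"), ("HAKAI", "writer"), ("YTHDF1", "reader"), ("YTHDF2", "reader"), ("YTHDF3", "reader"), ("YTHDC1", "reader"), ("YTHDC2", "reader"), ("IGF2BP1", "reader"), ("IGF2BP2", "reader"), ("IGF2BP3", "reader"), ("HNRNPA2B1", "reader"), ("HNRNPC", "reader"), ("HNRNPG", "reader"), ("RBMX", "reader"), ("FMR1", "reader"), ("FMRP", "reader"), ("PRRC2A", "reader"), ("EIF3A", "reader"), ("EIF3B", "reader"), ("LRPPRC", "reader"), ("FTO", "eraser"), ("ALKBH5", "eraser")]), ("m1A", PySem.Dict.ofList [("TRMT6",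 "writer"), ("TRMT61A", "writer"), ("TRMT61B", "writer"), ("TRMT10C", "writer"), ("YTHDF1", "reader"), ("YTHDF2", "reader"), ("YTHDF3", "reader"), ("ALKBH1", "eraser"), ("ALKBH3", "eraser")]), ("m5C", PySem.Dict.ofList [("NSUN1", "writer"), ("NSUN2", "writer"), ("NSUN3", "writer"), ("NSUN4", "writer"), ("NSUN5", "writer"), ("NSUN6", "writer"), ("NSUN7", "writer"), ("DNMT2", "writer"), ("TRDMT1", "writer"), ("ALYREF", "reader"), ("YBX1", "reader"), ("YBX2", "reader")]), ("pseu", PySem.Dict.ofList [("PUS1", "writer"), ("PUS3", "writer"), ("PUS7", "writer"), ("PUS7L", "writer"), ("PUS10", "writer"), ("TRUB1", "writer"), ("TRUB2", "writer"), ("DKC1", "writer"), ("RPUSD1", "writer"), ("RPUSD2", "writer"), ("RPUSD3", "writer"), ("RPUSD4", "writer")])]).get? k).getD d from rfl,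
      show PySem.Dict.getD pvRoleMembers = fun k d => ((PySem.Dict.mk [("m6A", PySem.Dict.ofList [("writer", PySem.Set.ofList ["METTL3", "METTL14", "METTL16", "WTAP", "VIRMA", "KIAA1429", "RBM15", "RBM15B", "ZC3H13", "CBLL1", "HAKAI"]), ("reader", PySem.Set.ofList ["YTHDF1", "YTHDF2", "YTHDF3", "YTHDC1", "YTHDC2", "IGF2BP1", "IGF2BP2", "IGF2BP3", "HNRNPA2B1", "HNRNPC", "HNRNPG", "RBMX", "FMR1", "FMRP", "PRRC2A", "EIF3A", "EIF3B", "LRPPRC"]), ("eraser", PySem.Set.ofList ["FTO", "ALKBH5"])]), ("m1A", PySem.Dict.ofList [("writer", PySem.Set.ofList ["TRMT6", "TRMT61A", "TRMT61B", "TRMT10C"]), ("reader", PySem.Set.ofList ["YTHDF1", "YTHDF2", "YTHDF3"]), ("eraser", PySem.Set.ofList ["ALKBH1", "ALKBH3"])]), ("m5C", PySem.Dict.ofList [("writer", PySem.Set.ofList ["NSUN1", "NSUN2", "NSUN3", "NSUN4", "NSUN5", "NSUN6", "NSUN7", "DNMT2", "TRDMT1"]), ("reader", PySem.Set.ofList ["ALYREF",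 "YBX1", "YBX2"]), ("eraser", PySem.Set.ofList [])]), ("pseu", PySem.Dict.ofList [("writer", PySem.Set.ofList ["PUS1", "PUS3", "PUS7", "PUS7L", "PUS10", "TRUB1", "TRUB2", "DKC1", "RPUSD1", "RPUSD2", "RPUSD3", "RPUSD4"]), ("reader", PySem.Set.ofList []), ("eraser", PySem.Set.ofList [])])]).get? k).getD d from rfl]
  rcases hr with rfl | rfl | rfl <;>
    simp [Ne.symm h1, Ne.symm h2, Ne.symm h3, Ne.symm h4, PySem.Dict.get?]

-- filtering a sorted list is sorting the filtered list
theorem pvFilter_sorted (names : List String) (p : String → Bool) :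
    (PySem.List.sorted names (fun x => x) false).filter p =
      PySem.List.sorted (names.filter p) (fun x => x) false := by
  exact (PySem.List.sorted_id_eq_of_perm_of_pairwise (names.filter p)
    ((PySem.List.sorted names (fun x => x) false).filter p)
    ((PySem.List.sorted_perm names (fun x => x) false).filter p)
    ((PySem.List.sorted_pairwise names (fun x => x)).filter p)).symm

-- one bucket entry of A equals one bucket entry of B, given equal predicates
theorem pvEntry_eq (names : List String) (p q : String → Bool) (hpq : ∀ n, p n = q n) :
    (if (names.filter p).isEmpty then none
      else some (PySem.List.sorted (names.filter p) (fun x => x) false))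
    = (if ((PySem.List.sorted names (fun x => x) false).filter q).isEmpty then none
      else some ((PySem.List.sorted names (fun x => x) false).filter q)) := by
  have hq : names.filter p = names.filter q := List.filter_congr (fun x _ => hpq x)
  rw [hq, pvFilter_sorted]
  have he : (PySem.List.sorted (names.filter q) (fun x => x) false).isEmpty
      = (names.filter q).isEmpty := by
    rw [Bool.eq_iff_iff]
    simp [List.isEmpty_iff, PySem.List.sorted_eq_nil_iff]
  rw [he]

-- ===== VERDICT (by name: the statement is the Claim_ definition above) =====
theorem split_rbp_by_role_py_spec : Claim_equal_split_rbp_by_role_py := by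
  intro names mod_type _
  unfold Spec_split_rbp_by_role_py split_rbp_by_role_py split_rbp_by_role_py_alt
  rw [pvALoop_foldl_eq mod_type names [] [] []]
  simp only [List.nil_append, pvRoleOrder, List.map_cons, List.map_nil]
  rw [pvEntry_eq names _ _ (fun n => pvPred_eq mod_type n "writer" (Or.inl rfl)),
      pvEntry_eq names _ _ (fun n => pvPred_eq mod_type n "reader" (Or.inr (Or.inl rfl))),
      pvEntry_eq names _ _ (fun n => pvPred_eq mod_type n "eraser" (Or.inr (Or.inr rfl)))]
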